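-- pv_equiv track=rewrite | github.com/4D-GRAPHS/4D-GRAPHS-prototype | commons/tuples_from_boolean_df.py | _get_max_tuples_recursive
-- ===== SOURCE A (Python) =====
-- def _get_max_tuples_recursive(l_in, l_out, l_out_index, l_buff, index, max_len):
--     l = []
--     while l == [] and l_in:
--         l, l_in = l_in[0], l_in[1:]
--         index = index + 1
--
--     if not l_in and l == []:
--         if len(l_out) >= max_len and l_out:
--             return l_buff + [(l_out, l_out_index)], len(l_out)
--         else:
--             return l_buff, max_len
--
--     l_buff, max_len_rec = _get_max_tuples_recursive(l_in, l_out, l_out_index, l_buff, index, max_len)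
--     max_len = max(max_len, max_len_rec)
--
--     for i in l:
--         if i not in l_out:
--             l_buff, max_len_rec = _get_max_tuples_recursive(l_in, l_out + [i], l_out_index + [index], l_buff, index,
--                                                             max_len)
--             max_len = max(max_len, max_len_rec)
--
--     return l_buff, max_len
-- ===== SOURCE B (Python) =====
-- def _get_max_tuples_recursive(l_in, l_out, l_out_index, l_buff, index, max_len):
--     # Iterative DFS with an explicit stack instead of recursion; same preorder
--     # visit order, one shared max_len and a result list seeded from l_buff.
--     result = list(l_buff)
--     stack = [(l_in, l_out, l_out_index, index)]
--     while stack: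
--         l_in, l_out, l_out_index, index = stack.pop()
--         l = []
--         while l == [] and l_in:
--             l, l_in = l_in[0], l_in[1:]
--             index = index + 1
--         if not l_in and l == []:
--             if len(l_out) >= max_len and l_out:
--                 result.append((l_out, l_out_index))
--                 max_len = len(l_out)
--             continue
--         for i in reversed(l):
--             if i not in l_out:
--                 stack.append((l_in, l_out + [i], l_out_index + [index], index))
--         stack.append((l_in, l_out, l_out_index, index))
--     return result, max_len
-- ===== Notes on version B (the rewrite author's own statement) =====
-- stated objective: alternative
-- what changed: Replaces A's recursion (recursive skip-branch call plus a for loop of recursive pick-branch calls threading max_len) with an iterative depth-first search over an explicit stack of states, a single shared max_len and a result list seeded from l_buff, pushing pick states in reverse so the preorder leaf order is preserved.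
import Mathlib
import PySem

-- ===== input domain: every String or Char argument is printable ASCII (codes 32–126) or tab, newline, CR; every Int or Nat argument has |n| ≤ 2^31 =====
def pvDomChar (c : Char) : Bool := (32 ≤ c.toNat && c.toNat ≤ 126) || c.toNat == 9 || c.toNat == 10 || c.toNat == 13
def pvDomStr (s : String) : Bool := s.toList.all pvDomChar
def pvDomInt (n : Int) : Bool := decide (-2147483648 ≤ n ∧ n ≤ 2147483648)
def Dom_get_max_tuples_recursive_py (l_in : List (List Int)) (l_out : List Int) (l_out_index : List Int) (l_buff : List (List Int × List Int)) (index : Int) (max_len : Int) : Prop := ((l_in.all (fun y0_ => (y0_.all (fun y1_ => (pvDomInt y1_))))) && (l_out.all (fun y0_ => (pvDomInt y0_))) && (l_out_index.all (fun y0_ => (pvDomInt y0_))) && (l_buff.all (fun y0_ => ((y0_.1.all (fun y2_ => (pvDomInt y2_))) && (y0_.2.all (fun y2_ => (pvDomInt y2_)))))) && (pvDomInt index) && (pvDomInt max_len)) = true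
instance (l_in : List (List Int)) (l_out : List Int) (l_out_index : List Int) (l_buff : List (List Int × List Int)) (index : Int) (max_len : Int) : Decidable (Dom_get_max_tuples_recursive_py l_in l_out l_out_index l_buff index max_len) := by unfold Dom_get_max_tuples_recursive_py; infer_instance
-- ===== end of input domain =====

-- B replaces A's recursion by an iterative DFS over an explicit stack with one
-- shared max_len and a result list seeded from l_buff (objective: alternative
-- decomposition); the return value is proved identical on every input.

-- ===== PORT A =====
-- A's `for i in l:` loop, threading (l_buff, max_len); the pick-branch recursive
-- call is the function argument f (A instantiates it with its own recursion)
def pvALoop (f : List Int → List Int → List (List Int × List Int) → Int → (List (List Int × List Int)) × Int)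
    (l : List Int) (l_out : List Int) (loi : List Int) (ix : Int) (st : (List (List Int × List Int)) × Int) : (List (List Int × List Int)) × Int :=
  match l with
  | [] => st
  | i :: ls =>
    if i ∈ l_out then pvALoop f ls l_out loi ix st
    else
      let r := f (l_out ++ [i]) (loi ++ [ix]) st.1 st.2
      pvALoop f ls l_out loi ix (r.1, max st.2 r.2)

-- the leading `while l == [] and l_in:` loop is the structural self-call on the
-- empty head (index + 1 each pop); l_in = [] is exactly Python's leaf case
def get_max_tuples_recursive_py (l_in : List (List Int)) (l_out : List Int) (l_out_index : List Int) (l_buff : List (List Int × List Int)) (index : Int) (max_len : Int) : (List (List Int × List Int)) × Int :=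
  match l_in with
  | [] =>
    if l_out.length ≥ max_len ∧ l_out ≠ [] then (l_buff ++ [(l_out, l_out_index)], (l_out.length : Int))
    else (l_buff, max_len)
  | x :: rest =>
    if x = [] then get_max_tuples_recursive_py rest l_out l_out_index l_buff (index + 1) max_len
    else
      let r := get_max_tuples_recursive_py rest l_out l_out_index l_buff (index + 1) max_len
      pvALoop (fun lo loi b m => get_max_tuples_recursive_py rest lo loi b (index + 1) m)
        x l_out l_out_index (index + 1) (r.1, max max_len r.2)

-- ===== PORT B =====
-- B's `while l == [] and l_in:` skip loop: (l, remaining l_in, number of pops)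
def pvSkip : List (List Int) → List Int × List (List Int) × Nat
  | [] => ([], [], 0)
  | x :: rest =>
    if x = [] then
      let t := pvSkip rest
      (t.1, t.2.1, t.2.2 + 1)
    else (x, rest, 1)

-- B's `for i in reversed(l): if i not in l_out: stack.append(...)` push loop
-- (called with l.reverse, since pushing onto a cons-list stack reverses again)
def pvPush (lin' : List (List Int)) (l_out : List Int) (loi : List Int) (ix : Int)
    (l : List Int) (s : List (List (List Int) × List Int × List Int × Int)) :
    List (List (List Int) × List Int × List Int × Int) :=
  l.foldl (fun s i => if i ∈ l_out then s else (lin', l_out ++ [i], loi ++ [ix], ix) :: s) s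

-- fuel bound for B's while loop (upper bound on its iteration count; used only
-- to make the loop structurally recursive — proved sufficient below)
def pvW : List (List Int) → Nat
  | [] => 1
  | x :: rest => if x = [] then pvW rest else 1 + (1 + x.length) * pvW rest

-- B's `while stack:` loop: pop a state, skip leading empty lists, handle a leaf
-- or push the pick states (reversed) and the skip state; fuel only guards
-- termination and is never exhausted when called from get_max_tuples_recursive_py_alt
def pvBLoop (fuel : Nat) (stack : List (List (List Int) × List Int × List Int × Int)) (result : List (List Int × List Int)) (max_len : Int) : (List (List Int × List Int)) × Int :=
  match stack, fuel with
  | [], _ => (result, max_len)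
  | _ :: _, 0 => (result, max_len)
  | (l_in, l_out, l_out_index, index) :: rest, n + 1 =>
    let t := pvSkip l_in
    let l := t.1
    let lin' := t.2.1
    let index' := index + (t.2.2 : Int)
    if lin' = [] ∧ l = [] then
      if l_out.length ≥ max_len ∧ l_out ≠ [] then
        pvBLoop n rest (result ++ [(l_out, l_out_index)]) (l_out.length : Int)
      else pvBLoop n rest result max_len
    else
      pvBLoop n ((lin', l_out, l_out_index, index') :: pvPush lin' l_out l_out_index index' l.reverse rest) result max_len

def get_max_tuples_recursive_py_alt (l_in : List (List Int)) (l_out : List Int) (l_out_index : List Int) (l_buff : List (List Int × List Int)) (index : Int) (max_len : Int) : (List (List Int × List Int)) × Int :=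
  pvBLoop (pvW l_in) [(l_in, l_out, l_out_index, index)] l_buff max_len

-- ===== PRECONDITION & SPEC =====
def Spec_get_max_tuples_recursive_py (l_in : List (List Int)) (l_out : List Int) (l_out_index : List Int) (l_buff : List (List Int × List Int)) (index : Int) (max_len : Int) (out : (List (List Int × List Int)) × Int) : Prop := out = get_max_tuples_recursive_py_alt l_in l_out l_out_index l_buff index max_len
instance (l_in : List (List Int)) (l_out : List Int) (l_out_index : List Int) (l_buff : List (List Int × List Int)) (index : Int) (max_len : Int) (out : (List (List Int × List Int)) × Int) : Decidable (Spec_get_max_tuples_recursive_py l_in l_out l_out_index l_buff index max_len out) := by unfold Spec_get_max_tuples_recursive_py; infer_instance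

-- ===== CLAIM (what is proved, stated in full; the proofs are below) =====
def Claim_equal_get_max_tuples_recursive_py : Prop := ∀ (l_in : List (List Int)) (l_out : List Int) (l_out_index : List Int) (l_buff : List (List Int × List Int)) (index : Int) (max_len : Int), Dom_get_max_tuples_recursive_py l_in l_out l_out_index l_buff index max_len → Spec_get_max_tuples_recursive_py l_in l_out l_out_index l_buff index max_len (get_max_tuples_recursive_py l_in l_out l_out_index l_buff index max_len)

-- ===== LEMMAS AND PROOFS =====

-- A's loop never decreases the running max_len
theorem pv_mono_loop (f : List Int → List Int → List (List Int × List Int) → Int → (List (List Int × List Int)) × Int)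
    (l_out : List Int) (loi : List Int) (ix : Int) :
    ∀ (l : List Int) (st : (List (List Int × List Int)) × Int), st.2 ≤ (pvALoop f l l_out loi ix st).2 := by
  intro l
  induction l with
  | nil => intro st; rw [pvALoop]
  | cons a t ih =>
    intro st
    rw [pvALoop]
    by_cases ha : a ∈ l_out
    · simp only [ha, if_true]; exact ih st
    · simp only [ha, if_false]
      have h1 := ih ((f (l_out ++ [a]) (loi ++ [ix]) st.1 st.2).1,
        max st.2 (f (l_out ++ [a]) (loi ++ [ix]) st.1 st.2).2)
      simp only at h1
      omega

-- A's returned max_len never drops below the incoming one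
theorem pv_mono : ∀ (l_in : List (List Int)) (l_out loi : List Int) (b : List (List Int × List Int)) (i m : Int),
    m ≤ (get_max_tuples_recursive_py l_in l_out loi b i m).2 := by
  intro l_in
  induction l_in with
  | nil =>
    intro l_out loi b i m
    rw [get_max_tuples_recursive_py]
    split
    · rename_i hc; exact hc.1
    · exact le_refl m
  | cons x rest ih =>
    intro l_out loi b i m
    rw [get_max_tuples_recursive_py]
    by_cases hx : x = []
    · simp only [hx, if_true]
      exact ih l_out loi b (i + 1) m
    · simp only [hx, if_false]
      have hl := pv_mono_loop (fun lo loi2 b2 m2 => get_max_tuples_recursive_py rest lo loi2 b2 (i + 1) m2)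
        l_out loi (i + 1) x
        ((get_max_tuples_recursive_py rest l_out loi b (i + 1) m).1,
         max m (get_max_tuples_recursive_py rest l_out loi b (i + 1) m).2)
      simp only at hl
      exact le_trans (le_max_left m _) hl

-- B's push loop produces exactly the filtered pick states, in l's order, on top of rest
theorem pv_push_eq (lin' : List (List Int)) (l_out : List Int) (loi : List Int) (ix : Int) :
    ∀ (l : List Int) (rest : List (List (List Int) × List Int × List Int × Int)),
    pvPush lin' l_out loi ix l.reverse rest
      = (l.filter (fun i => ¬ (i ∈ l_out))).map (fun i => (lin', l_out ++ [i], loi ++ [ix], ix)) ++ rest := by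
  intro l
  induction l with
  | nil => intro rest; simp [pvPush]
  | cons a t ih =>
    intro rest
    simp only [pvPush, List.reverse_cons, List.foldl_append, List.foldl_cons, List.foldl_nil]
    have iht := ih rest
    simp only [pvPush] at iht
    rw [iht]
    by_cases ha : a ∈ l_out
    · rw [if_pos ha, List.filter_cons, if_neg (by simpa using ha)]
    · rw [if_neg ha, List.filter_cons, if_pos (by simpa using ha)]
      simp

-- a state whose list starts with an empty row behaves like the state one skip
-- step further (any fuel): B's one loop iteration swallows the whole skip chain
theorem pv_shift (rest' : List (List Int)) (lo loi : List Int) (ix : Int)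
    (rest : List (List (List Int) × List Int × List Int × Int)) (res : List (List Int × List Int)) (m : Int) :
    ∀ (fuel : Nat),
    pvBLoop fuel ((([] : List Int) :: rest', lo, loi, ix) :: rest) res m
      = pvBLoop fuel ((rest', lo, loi, ix + 1) :: rest) res m := by
  intro fuel
  cases fuel with
  | zero => rfl
  | succ n =>
    rw [pvBLoop, pvBLoop]
    have h1 : pvSkip (([] : List Int) :: rest') = ((pvSkip rest').1, (pvSkip rest').2.1, (pvSkip rest').2.2 + 1) := by
      simp [pvSkip]
    simp only [h1]
    have h2 : ix + (((pvSkip rest').2.2 + 1 : Nat) : Int) = (ix + 1) + ((pvSkip rest').2.2 : Int) := by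
      push_cast; ring
    rw [h2]

-- the key simulation, loop part: B's DFS on the pick states equals A's for loop
theorem pv_key_loop (lin' : List (List Int)) (l_out : List Int) (loi : List Int) (ix : Int)
    (hmain : ∀ (lo2 loi2 : List Int) (res : List (List Int × List Int)) (m : Int) (k : Nat)
      (rest : List (List (List Int) × List Int × List Int × Int)),
      ∃ k', k ≤ k' ∧ pvBLoop (pvW lin' + k) ((lin', lo2, loi2, ix) :: rest) res m
        = pvBLoop k' rest (get_max_tuples_recursive_py lin' lo2 loi2 res ix m).1 (get_max_tuples_recursive_py lin' lo2 loi2 res ix m).2) :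
    ∀ (l : List Int) (k : Nat) (rest : List (List (List Int) × List Int × List Int × Int)) (res : List (List Int × List Int)) (m : Int),
    ∃ k', k ≤ k' ∧
    pvBLoop (l.length * pvW lin' + k) ((l.filter (fun i => ¬ (i ∈ l_out))).map (fun i => (lin', l_out ++ [i], loi ++ [ix], ix)) ++ rest) res m
      = pvBLoop k' rest (pvALoop (fun lo2 loi2 b m2 => get_max_tuples_recursive_py lin' lo2 loi2 b ix m2) l l_out loi ix (res, m)).1
          (pvALoop (fun lo2 loi2 b m2 => get_max_tuples_recursive_py lin' lo2 loi2 b ix m2) l l_out loi ix (res, m)).2 := by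
  intro l
  induction l with
  | nil =>
    intro k rest res m
    refine ⟨k, le_refl k, ?_⟩
    simp only [List.filter_nil, List.map_nil, List.nil_append, List.length_nil, Nat.zero_mul, Nat.zero_add]
    rw [pvALoop]
  | cons a t ih =>
    intro k rest res m
    by_cases ha : a ∈ l_out
    · have hfuel : (a :: t).length * pvW lin' + k = t.length * pvW lin' + (pvW lin' + k) := by
        simp [List.length_cons]; ring
      obtain ⟨k', hk', heq⟩ := ih (pvW lin' + k) rest res m
      refine ⟨k', by omega, ?_⟩
      rw [hfuel, List.filter_cons, if_neg (by simpa using ha), pvALoop, if_pos ha]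
      exact heq
    · have hfuel : (a :: t).length * pvW lin' + k = pvW lin' + (t.length * pvW lin' + k) := by
        simp [List.length_cons]; ring
      obtain ⟨k1, hk1, heq1⟩ := hmain (l_out ++ [a]) (loi ++ [ix]) res m (t.length * pvW lin' + k)
        ((t.filter (fun i => ¬ (i ∈ l_out))).map (fun i => (lin', l_out ++ [i], loi ++ [ix], ix)) ++ rest)
      obtain ⟨k2, hk2⟩ : ∃ k2, k1 = t.length * pvW lin' + k2 ∧ k ≤ k2 := ⟨k1 - t.length * pvW lin', by omega⟩
      obtain ⟨k3, hk3, heq3⟩ := ih k2 rest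
        (get_max_tuples_recursive_py lin' (l_out ++ [a]) (loi ++ [ix]) res ix m).1
        (get_max_tuples_recursive_py lin' (l_out ++ [a]) (loi ++ [ix]) res ix m).2
      refine ⟨k3, by omega, ?_⟩
      rw [hfuel, List.filter_cons, if_pos (by simpa using ha), List.map_cons, List.cons_append, heq1,
        hk2.1, heq3, pvALoop, if_neg ha]
      have hmx : max m (get_max_tuples_recursive_py lin' (l_out ++ [a]) (loi ++ [ix]) res ix m).2
          = (get_max_tuples_recursive_py lin' (l_out ++ [a]) (loi ++ [ix]) res ix m).2 := by
        have := pv_mono lin' (l_out ++ [a]) (loi ++ [ix]) res ix m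
        omega
      simp only [hmx]

-- the key simulation: B's DFS on one popped state equals running A on that state
theorem pv_key : ∀ (l_in : List (List Int)) (lo loi : List Int) (ix : Int) (res : List (List Int × List Int)) (m : Int) (k : Nat)
    (rest : List (List (List Int) × List Int × List Int × Int)),
    ∃ k', k ≤ k' ∧ pvBLoop (pvW l_in + k) ((l_in, lo, loi, ix) :: rest) res m
      = pvBLoop k' rest (get_max_tuples_recursive_py l_in lo loi res ix m).1 (get_max_tuples_recursive_py l_in lo loi res ix m).2 := by
  intro l_in
  induction l_in with
  | nil =>
    intro lo loi ix res m k rest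
    refine ⟨k, le_refl k, ?_⟩
    have h1 : pvW ([] : List (List Int)) + k = k + 1 := by rw [pvW]; omega
    rw [h1, pvBLoop, get_max_tuples_recursive_py]
    split
    · split <;> rfl
    · rename_i hno; exact absurd ⟨rfl, rfl⟩ hno
  | cons x rest' ih =>
    intro lo loi ix res m k rest
    by_cases hx : x = []
    · subst hx
      have h1 : pvW (([] : List Int) :: rest') = pvW rest' := by simp [pvW]
      obtain ⟨k', hk', heq⟩ := ih lo loi (ix + 1) res m k rest
      refine ⟨k', hk', ?_⟩
      rw [h1, pv_shift, heq, get_max_tuples_recursive_py]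
      simp only [if_true]
    · have h1 : pvW (x :: rest') + k = ((1 + x.length) * pvW rest' + k) + 1 := by
        rw [pvW, if_neg hx]; ring
      have hskip : pvSkip (x :: rest') = (x, rest', 1) := by rw [pvSkip, if_neg hx]
      have hmain := fun lo2 loi2 res2 m2 k2 rest2 => ih lo2 loi2 (ix + 1) res2 m2 k2 rest2
      obtain ⟨k1, hk1, heq1⟩ := ih lo loi (ix + 1) res m (x.length * pvW rest' + k)
        (pvPush rest' lo loi (ix + 1) x.reverse rest)
      obtain ⟨k2, hk2⟩ : ∃ k2, k1 = x.length * pvW rest' + k2 ∧ k ≤ k2 := ⟨k1 - x.length * pvW rest', by omega⟩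
      obtain ⟨k3, hk3, heq3⟩ := pv_key_loop rest' lo loi (ix + 1) hmain x k2 rest
        (get_max_tuples_recursive_py rest' lo loi res (ix + 1) m).1
        (get_max_tuples_recursive_py rest' lo loi res (ix + 1) m).2
      refine ⟨k3, by omega, ?_⟩
      rw [h1, pvBLoop]
      simp only [hskip]
      rw [if_neg (by intro hc; exact hx hc.2)]
      have hfuel2 : (1 + x.length) * pvW rest' + k = pvW rest' + (x.length * pvW rest' + k) := by ring
      have hidx : ix + ((1 : Nat) : Int) = ix + 1 := by norm_num
      rw [hidx, hfuel2, heq1, hk2.1, pv_push_eq, heq3, get_max_tuples_recursive_py]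
      rw [if_neg hx]
      have hmx : max m (get_max_tuples_recursive_py rest' lo loi res (ix + 1) m).2
          = (get_max_tuples_recursive_py rest' lo loi res (ix + 1) m).2 := by
        have := pv_mono rest' lo loi res (ix + 1) m
        omega
      simp only [hmx]

-- ===== VERDICT (by name: the statement is the Claim_ definition above) =====
theorem get_max_tuples_recursive_py_spec : Claim_equal_get_max_tuples_recursive_py := by
  intro l_in l_out l_out_index l_buff index max_len _
  unfold Spec_get_max_tuples_recursive_py get_max_tuples_recursive_py_alt
  obtain ⟨k', _, heq⟩ := pv_key l_in l_out l_out_index index l_buff max_len 0 []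
  rw [Nat.add_zero] at heq
  rw [heq, pvBLoop]
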